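-- pv_equiv track=rewrite | github.com/henry167b/DSA4265-group8 | RAG_test/common.py | resolve_companies
-- ===== SOURCE A (Python) =====
-- from typing import Dict, List, Optional
--
-- COMPANIES: List[Dict[str, str]] = [
--     {"company_name": "Apple", "ticker": "AAPL"},
--     {"company_name": "Alphabet", "ticker": "GOOG"},
--     {"company_name": "Meta Platforms", "ticker": "META"},
--     {"company_name": "NVIDIA", "ticker": "NVDA"},
--     {"company_name": "Tesla", "ticker": "TSLA"},
-- ]
--
-- def resolve_companies(selected_tickers: Optional[List[str]] = None) -> List[Dict[str, str]]:
--     if not selected_tickers: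
--         return list(COMPANIES)
--
--     normalized = [ticker.strip().upper() for ticker in selected_tickers if ticker.strip()]
--     if not normalized:
--         return list(COMPANIES)
--
--     companies_by_ticker = {company["ticker"].upper(): company for company in COMPANIES}
--     unknown = [ticker for ticker in normalized if ticker not in companies_by_ticker]
--     if unknown:
--         supported = ", ".join(sorted(companies_by_ticker))
--         raise ValueError(
--             f"Unsupported ticker(s): {', '.join(unknown)}. Supported benchmark tickers: {supported}."
--         )
--
--     return [companies_by_ticker[ticker] for ticker in normalized]
-- ===== SOURCE B (Python) =====
-- from typing import Dict, List, Optional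
--
-- COMPANIES: List[Dict[str, str]] = [
--     {"company_name": "Apple", "ticker": "AAPL"},
--     {"company_name": "Alphabet", "ticker": "GOOG"},
--     {"company_name": "Meta Platforms", "ticker": "META"},
--     {"company_name": "NVIDIA", "ticker": "NVDA"},
--     {"company_name": "Tesla", "ticker": "TSLA"},
-- ]
--
-- def resolve_companies(selected_tickers: Optional[List[str]] = None) -> List[Dict[str, str]]:
--     if not selected_tickers:
--         return list(COMPANIES)
--
--     normalized = [ticker.strip().upper() for ticker in selected_tickers if ticker.strip()]
--     if not normalized:
--         return list(COMPANIES)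
--
--     # Invert the traversal: one outer pass over COMPANIES fills the slots of every
--     # requested ticker; no ticker->company index and no per-ticker lookup pass.
--     slots: List[Optional[Dict[str, str]]] = [None] * len(normalized)
--     for company in COMPANIES:
--         ticker = company["ticker"].upper()
--         for i, wanted in enumerate(normalized):
--             if wanted == ticker:
--                 slots[i] = company
--
--     missing = [normalized[i] for i, slot in enumerate(slots) if slot is None]
--     if missing:
--         supported = ", ".join(sorted(company["ticker"].upper() for company in COMPANIES))
--         raise ValueError(
--             f"Unsupported ticker(s): {', '.join(missing)}. Supported benchmark tickers: {supported}."
--         )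
--
--     return slots
-- ===== Notes on version B (the rewrite author's own statement) =====
-- stated objective: alternative
-- what changed: Inverts the traversal: instead of building a ticker->company dict and then filtering/mapping the requested tickers, B makes one outer pass over COMPANIES that fills a slot array aligned with the normalized request list, then reads off missing slots; no index and no per-ticker lookup pass.
import Mathlib
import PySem

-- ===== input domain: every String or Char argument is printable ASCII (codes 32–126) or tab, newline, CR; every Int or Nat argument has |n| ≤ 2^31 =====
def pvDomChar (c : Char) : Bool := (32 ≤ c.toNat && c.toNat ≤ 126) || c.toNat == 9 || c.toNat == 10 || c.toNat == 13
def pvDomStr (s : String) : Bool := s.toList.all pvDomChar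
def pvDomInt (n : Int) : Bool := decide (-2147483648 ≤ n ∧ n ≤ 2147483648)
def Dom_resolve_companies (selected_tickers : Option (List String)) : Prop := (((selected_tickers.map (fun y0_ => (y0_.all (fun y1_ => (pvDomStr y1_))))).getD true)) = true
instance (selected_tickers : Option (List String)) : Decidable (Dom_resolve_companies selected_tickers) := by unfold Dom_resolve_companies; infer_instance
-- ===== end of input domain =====

-- B inverts the traversal: instead of A's "build a ticker→company dict, filter unknowns, map lookups",
-- it makes one outer pass over COMPANIES filling a slot list aligned with the normalized request list,
-- then reads missing tickers off the empty slots (alternative decomposition, not faster).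
-- Pre_ excludes inputs containing an unsupported ticker, on which both Pythons raise ValueError.

-- ===== PORT A =====
def pvCOMPANIES : List (List (String × String)) :=
  [ [("company_name", "Apple"), ("ticker", "AAPL")]
  , [("company_name", "Alphabet"), ("ticker", "GOOG")]
  , [("company_name", "Meta Platforms"), ("ticker", "META")]
  , [("company_name", "NVIDIA"), ("ticker", "NVDA")]
  , [("company_name", "Tesla"), ("ticker", "TSLA")] ]

-- c["ticker"] on a company dict (never missing in COMPANIES; assoc-list first-match lookup)
def pvTickerOf (c : List (String × String)) : String := ((c.lookup "ticker").getD "")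

def resolve_companies (selected_tickers : Option (List String)) : List (List (String × String)) :=
  match selected_tickers with
  | none => pvCOMPANIES
  | some ts =>
    if ts = [] then pvCOMPANIES
    else
      let normalized := (ts.filter (fun t => PySem.Str.strip t ≠ "")).map
        (fun t => PySem.Str.upper (PySem.Str.strip t))
      if normalized = [] then pvCOMPANIES
      else
        let d := pvCOMPANIES.foldl
          (fun d c => d.insert (PySem.Str.upper (pvTickerOf c)) c) PySem.Dict.empty
        let unknown := normalized.filter (fun t => ¬ d.contains t)
        if unknown ≠ [] then []  -- Python raises ValueError here; excluded by Pre_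
        else normalized.map (fun t => (d.get? t).getD [])

-- ===== PORT B =====
-- the inner "for i, wanted in enumerate(normalized): if wanted == ticker: slots[i] = company"
-- pass of Source B, expressed as the elementwise update of the slot list aligned with normalized
def pvFill (normalized : List String) (slots : List (Option (List (String × String))))
    (c : List (String × String)) : List (Option (List (String × String))) :=
  List.zipWith (fun s w => if w = PySem.Str.upper (pvTickerOf c) then some c else s)
    slots normalized

def resolve_companies_alt (selected_tickers : Option (List String)) : List (List (String × String)) :=
  match selected_tickers with
  | none => pvCOMPANIES
  | some ts =>
    if ts = [] then pvCOMPANIES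
    else
      let normalized := (ts.filter (fun t => PySem.Str.strip t ≠ "")).map
        (fun t => PySem.Str.upper (PySem.Str.strip t))
      if normalized = [] then pvCOMPANIES
      else
        let slots := pvCOMPANIES.foldl (pvFill normalized)
          (List.replicate normalized.length none)
        let missing := ((normalized.zip slots).filter (fun p => p.2.isNone)).map (·.1)
        if missing ≠ [] then []  -- Python raises ValueError here; excluded by Pre_
        else slots.map (fun s => s.getD [])  -- all slots are `some` here: Python returns slots

-- ===== PRECONDITION & SPEC =====
-- Pre_ excludes exactly the inputs on which A (and B) raise ValueError: some ticker that is
-- non-blank after stripping does not normalize to one of the five supported tickers.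
def Pre_resolve_companies (selected_tickers : Option (List String)) : Prop :=
  ∀ s ∈ selected_tickers.getD [], PySem.Str.strip s = "" ∨
    PySem.Str.upper (PySem.Str.strip s) ∈ ["AAPL", "GOOG", "META", "NVDA", "TSLA"]
instance (selected_tickers : Option (List String)) : Decidable (Pre_resolve_companies selected_tickers) := by unfold Pre_resolve_companies; infer_instance
def pvWitness_resolve_companies : Option (List String) := some ["aapl", " TSLA ", ""]

def Spec_resolve_companies (selected_tickers : Option (List String)) (out : List (List (String × String))) : Prop := out = resolve_companies_alt selected_tickers
instance (selected_tickers : Option (List String)) (out : List (List (String × String))) : Decidable (Spec_resolve_companies selected_tickers out) := by unfold Spec_resolve_companies; infer_instance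

-- ===== CLAIM (what is proved, stated in full; the proofs are below) =====
def Claim_equal_resolve_companies : Prop := ∀ (selected_tickers : Option (List String)), Dom_resolve_companies selected_tickers → Pre_resolve_companies selected_tickers → Spec_resolve_companies selected_tickers (resolve_companies selected_tickers)

-- ===== LEMMAS AND PROOFS =====

-- A's ticker index, as the closed term the port builds
def pvDictA : PySem.Dict String (List (String × String)) :=
  pvCOMPANIES.foldl (fun d c => d.insert (PySem.Str.upper (pvTickerOf c)) c) PySem.Dict.empty

-- the per-slot effect of B's whole outer pass, for one requested ticker
def pvScan (t : String) : Option (List (String × String)) :=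
  pvCOMPANIES.foldl (fun s c => if t = PySem.Str.upper (pvTickerOf c) then some c else s) none

-- chaining two zipWiths against the same right list
theorem pv_zipWith_zipWith {α β γ δ : Type} (f : γ → β → δ) (g : α → β → γ)
    (a : List α) (b : List β) :
    List.zipWith f (List.zipWith g a b) b = List.zipWith (fun x y => f (g x y) y) a b := by
  induction a generalizing b with
  | nil => simp
  | cons x a ih => cases b <;> simp [ih]

theorem pv_zipWith_self {α β : Type} (a : List α) (b : List β)
    (h : a.length = b.length) : List.zipWith (fun x _ => x) a b = a := by
  induction a generalizing b with
  | nil => simp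
  | cons x a ih =>
    cases b with
    | nil => simp at h
    | cons y b => simp_all

-- B's fold over COMPANIES acts independently on each slot
theorem pv_fill_fold (cs : List (List (String × String))) (norm : List String)
    (slots : List (Option (List (String × String)))) (h : slots.length = norm.length) :
    cs.foldl (pvFill norm) slots
      = List.zipWith
          (fun s w => cs.foldl
            (fun s c => if w = PySem.Str.upper (pvTickerOf c) then some c else s) s)
          slots norm := by
  induction cs generalizing slots with
  | nil => simp [pv_zipWith_self _ _ h]
  | cons c cs ih =>
    simp only [List.foldl_cons]
    rw [ih _ (by simp [pvFill, h]), pvFill, pv_zipWith_zipWith]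

theorem pv_zipWith_replicate {α β : Type} (f : α → β → α) (a : α) (l : List β) :
    List.zipWith f (List.replicate l.length a) l = l.map (f a) := by
  induction l with
  | nil => simp
  | cons x l ih => simp [List.replicate_succ, ih]

-- For each supported ticker: A's dict contains it, and B's outer scan leaves in its slot
-- exactly the company A's dict lookup returns
theorem pv_lookup_agree (t : String)
    (ht : t ∈ ["AAPL", "GOOG", "META", "NVDA", "TSLA"]) :
    pvDictA.contains t = true ∧ pvScan t = some ((pvDictA.get? t).getD []) := by
  fin_cases ht <;> exact ⟨by decide, by decide⟩

-- no supported ticker is "unknown" in A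
theorem pv_no_unknown (l : List String)
    (hl : ∀ t ∈ l, t ∈ ["AAPL", "GOOG", "META", "NVDA", "TSLA"]) :
    l.filter (fun t => ¬ pvDictA.contains t) = [] := by
  rw [List.filter_eq_nil_iff]
  intro t ht
  obtain ⟨hc, -⟩ := pv_lookup_agree t (hl t ht)
  simp [hc]

-- ===== VERDICT (by name: the statement is the Claim_ definition above) =====
theorem resolve_companies_spec : Claim_equal_resolve_companies := by
  intro sel _ hpre
  unfold Spec_resolve_companies resolve_companies resolve_companies_alt
  match sel with
  | none => rfl
  | some ts =>
    by_cases hts : ts = []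
    · simp [hts]
    · simp only [if_neg hts]
      set normalized := (ts.filter (fun t => PySem.Str.strip t ≠ "")).map
        (fun t => PySem.Str.upper (PySem.Str.strip t)) with hn
      have hnorm : ∀ t ∈ normalized, t ∈ ["AAPL", "GOOG", "META", "NVDA", "TSLA"] := by
        intro t htm
        rw [hn] at htm
        obtain ⟨s, hs, rfl⟩ := List.mem_map.mp htm
        have hsf := List.mem_filter.mp hs
        rcases hpre s hsf.1 with h | h
        · exact absurd h (by simpa using hsf.2)
        · exact h
      by_cases hne : normalized = []
      · simp [hne]
      · simp only [if_neg hne]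
        -- B's slots: one `some` per normalized ticker, equal to A's lookup
        have hslots : pvCOMPANIES.foldl (pvFill normalized)
            (List.replicate normalized.length none)
            = normalized.map (fun t => some ((pvDictA.get? t).getD [])) := by
          rw [pv_fill_fold _ _ _ (by simp), pv_zipWith_replicate]
          exact List.map_congr_left (fun t ht => (pv_lookup_agree t (hnorm t ht)).2)
        have hmiss : ((normalized.zip (normalized.map
              (fun t => some ((pvDictA.get? t).getD [])))).filter
              (fun p => p.2.isNone)).map (·.1) = [] := by
          rw [List.map_eq_nil_iff, List.filter_eq_nil_iff]
          intro p hp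
          obtain ⟨-, h2⟩ := List.of_mem_zip hp
          obtain ⟨t, -, he⟩ := List.mem_map.mp h2
          simp [← he]
        show (if normalized.filter (fun t => ¬ pvDictA.contains t) ≠ [] then _ else
                normalized.map (fun t => (pvDictA.get? t).getD []))
          = (if _ ≠ ([] : List String) then _ else _)
        rw [pv_no_unknown normalized hnorm, hslots, hmiss]
        simp [List.map_map, Function.comp_def]
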